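-- pv_equiv track=rewrite | github.com/brunobotelhobr/My-IP-Calculator | src/app/calc.py | _decompress_mask_v6
-- ===== SOURCE A (Python) =====
-- from typing import List, Optional
--
-- def _decompress_mask_v6(mask: str) -> str:
--     """Decompress v6 mask, 64 = "ffff:ffff:ff..."""
--     # Validate the mask
--     mask = mask.replace("/", "")
--     if not 0 <= int(mask) <= 128:
--         raise ValueError("Invalid mask")
--     # Count the number of 1s and 0s
--     mask_bin: str = "1" * int(mask) + "0" * (128 - int(mask))
--     octets: List[str] = []
--     # Decompress the mask
--     for counter in range(0, 128, 16):
--         octets.append(str(hex(int(mask_bin[counter : counter + 16], 2))[2:]).upper().zfill(4))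
--     return ":".join(octets)
-- ===== SOURCE B (Python) =====
-- def _decompress_mask_v6(mask: str) -> str:
--     """Decompress v6 mask via integer arithmetic instead of a binary string."""
--     prefix = int(mask.replace("/", ""))
--     if not 0 <= prefix <= 128:
--         raise ValueError("Invalid mask")
--     full = ((1 << prefix) - 1) << (128 - prefix)
--     s = f"{full:032X}"
--     return ":".join(s[i:i + 4] for i in range(0, 32, 4))
-- ===== Notes on version B (the rewrite author's own statement) =====
-- stated objective: simpler
-- what changed: B drops A's 128-character binary string and the eight per-chunk base-2 parses: it builds the whole mask as one integer ((1<<prefix)-1)<<(128-prefix), formats it once as 32 zero-padded uppercase hex digits, and regroups them into eight colon-separated quads.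
import Mathlib
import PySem

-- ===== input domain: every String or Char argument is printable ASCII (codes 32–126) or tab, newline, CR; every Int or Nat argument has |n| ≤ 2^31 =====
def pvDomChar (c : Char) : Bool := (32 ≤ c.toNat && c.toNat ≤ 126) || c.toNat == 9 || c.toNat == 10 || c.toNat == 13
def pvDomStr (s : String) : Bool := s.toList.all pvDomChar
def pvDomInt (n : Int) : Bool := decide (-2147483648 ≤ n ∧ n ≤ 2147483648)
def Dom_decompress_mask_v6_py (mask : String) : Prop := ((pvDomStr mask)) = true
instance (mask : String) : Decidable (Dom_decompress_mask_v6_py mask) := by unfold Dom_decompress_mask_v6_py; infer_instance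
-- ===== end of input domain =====

-- B replaces the 128-char binary string and the per-chunk base-2 parse loop with one
-- integer mask formatted once as 32 hex digits and regrouped (objective: simpler).

-- ===== PORT A =====
-- hex(n)[2:] for n ≥ 0: lowercase hex digits, "0" for n = 0 — Nat.toDigits 16 is exactly that.
def pvHexLower (n : Nat) : List Char := Nat.toDigits 16 n

def decompress_mask_v6_py (mask : String) : String :=
  let m := PySem.Str.replace mask "/" ""
  -- int(mask): Pre_ excludes the ValueError cases (parse failure or value outside 0..128),
  -- so the .getD defaults below are never taken on admitted inputs (the inner base-2 parse
  -- of a 16-char '0'/'1' slice always succeeds).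
  let p : Int := (PySem.Int.ofStr? m).getD 0
  let maskBin : List Char :=
    List.replicate p.toNat '1' ++ List.replicate (128 - p.toNat) '0'
  let octets : List String :=
    (PySem.List.pyRange 0 128 16).foldl (fun acc counter =>
      acc ++ [String.ofList (PySem.Chars.zfill (PySem.Chars.upper
        (pvHexLower ((PySem.Int.ofCharsBase?
          (PySem.List.slice maskBin (some counter) (some (counter + 16))) 2).getD 0).toNat)) 4)]) []
  PySem.Str.join ":" octets

-- ===== PORT B =====
-- f"{full:032X}": uppercase hex digits of full (full ≥ 0 here), zero-padded to width 32.
def pvHexUpper32 (n : Nat) : List Char :=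
  PySem.Chars.zfill ((Nat.toDigits 16 n).map Char.toUpper) 32

def decompress_mask_v6_py_alt (mask : String) : String :=
  let p : Int := (PySem.Int.ofStr? (PySem.Str.replace mask "/" "")).getD 0
  let full : Nat := ((1 <<< p.toNat) - 1) <<< (128 - p.toNat)
  let s : List Char := pvHexUpper32 full
  PySem.Str.join ":" ((PySem.List.pyRange 0 32 4).map (fun i =>
    String.ofList (PySem.List.slice s (some i) (some (i + 4)))))

-- ===== PRECONDITION & SPEC =====
-- Pre_: exactly the inputs on which A returns — int(mask.replace("/","")) parses and its
-- value lies in 0..128 (otherwise A raises ValueError).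
def Pre_decompress_mask_v6_py (mask : String) : Prop :=
  (PySem.Int.ofStr? (PySem.Str.replace mask "/" "")).isSome = true
    ∧ 0 ≤ (PySem.Int.ofStr? (PySem.Str.replace mask "/" "")).getD 0
    ∧ (PySem.Int.ofStr? (PySem.Str.replace mask "/" "")).getD 0 ≤ 128

instance (mask : String) : Decidable (Pre_decompress_mask_v6_py mask) := by
  unfold Pre_decompress_mask_v6_py; infer_instance

def pvWitness_decompress_mask_v6_py : String := "/64"

def Spec_decompress_mask_v6_py (mask : String) (out : String) : Prop := out = decompress_mask_v6_py_alt mask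
instance (mask : String) (out : String) : Decidable (Spec_decompress_mask_v6_py mask out) := by unfold Spec_decompress_mask_v6_py; infer_instance

-- ===== CLAIM (what is proved, stated in full; the proofs are below) =====
def Claim_equal_decompress_mask_v6_py : Prop := ∀ (mask : String), Dom_decompress_mask_v6_py mask → Pre_decompress_mask_v6_py mask → Spec_decompress_mask_v6_py mask (decompress_mask_v6_py mask)

-- ===== LEMMAS AND PROOFS =====

-- the two ports after the shared parse, as pure char-list functions of the parsed prefix
def pvBodyA (p : Int) : List Char :=
  let maskBin : List Char :=
    List.replicate p.toNat '1' ++ List.replicate (128 - p.toNat) '0'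
  PySem.Chars.join [':'] ((PySem.List.pyRange 0 128 16).map (fun counter =>
    PySem.Chars.zfill (PySem.Chars.upper
      (pvHexLower ((PySem.Int.ofCharsBase?
        (PySem.List.slice maskBin (some counter) (some (counter + 16))) 2).getD 0).toNat)) 4))

def pvBodyB (p : Int) : List Char :=
  let s : List Char := pvHexUpper32 (((1 <<< p.toNat) - 1) <<< (128 - p.toNat))
  PySem.Chars.join [':'] ((PySem.List.pyRange 0 32 4).map (fun i =>
    PySem.List.slice s (some i) (some (i + 4))))

theorem pvBodyA_eq (mask : String) :
    (decompress_mask_v6_py mask).toList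
      = pvBodyA ((PySem.Int.ofStr? (PySem.Str.replace mask "/" "")).getD 0) := by
  unfold decompress_mask_v6_py pvBodyA
  rw [PySem.Str.toList_join, PySem.List.foldl_append_singleton_eq_map]
  simp [Function.comp_def, String.toList_ofList]

theorem pvBodyB_eq (mask : String) :
    (decompress_mask_v6_py_alt mask).toList
      = pvBodyB ((PySem.Int.ofStr? (PySem.Str.replace mask "/" "")).getD 0) := by
  unfold decompress_mask_v6_py_alt pvBodyB
  rw [PySem.Str.toList_join]
  simp [Function.comp_def, String.toList_ofList]

set_option maxRecDepth 16384 in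
set_option maxHeartbeats 4000000 in
theorem pvBody_agree_fin : ∀ n : Fin 129, pvBodyA (n : Int) = pvBodyB (n : Int) := by decide

theorem pvBody_agree (p : Int) (h0 : 0 ≤ p) (h1 : p ≤ 128) : pvBodyA p = pvBodyB p := by
  have hp : p = ((⟨p.toNat, by omega⟩ : Fin 129) : Int) := by simp; omega
  rw [hp]; exact pvBody_agree_fin _

-- ===== VERDICT (by name: the statement is the Claim_ definition above) =====
theorem decompress_mask_v6_py_spec : Claim_equal_decompress_mask_v6_py := by
  intro mask _ hpre
  unfold Spec_decompress_mask_v6_py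
  unfold Pre_decompress_mask_v6_py at hpre
  apply String.toList_inj.mp
  rw [pvBodyA_eq, pvBodyB_eq]
  exact pvBody_agree _ hpre.2.1 hpre.2.2
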